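-- pv_equiv track=rewrite | github.com/aaqilalhassan16/tathastu_week_of_code | Day6/p12.py | printlongestword
-- ===== SOURCE A (Python) =====
-- def canbuildword(s, isoriginalword, mp):
--
--     # If current string has been processed before
--     if s in mp and mp[s] == 0:
--         return False
--
--     # If current string is found in the map and
--     # it is not the string under consideration
--     if s in mp and mp[s] == 1 and isoriginalword == 0:
--         return True
--
--     for i in range(1, len(s)):
--
--         # Split the string into two
--         # contiguous sub-strings
--         left = s[:i]
--         right = s[i:]
--
--         # If left sub-string is found in the map and
--         # the right sub-string can be made from
--         # the strings from the given array
--         if left in mp and mp[left] == 1 and canbuildword(right, 0, mp):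
--             return True
--
--     # If everything failed, we return false
--     mp[s] = 0
--     return False
--
-- def printlongestword(listofwords):
--
--     # Put all the strings in the map
--     mp = dict()
--     for i in listofwords:
--         mp[i] = 1
--
--     # Sort the string in decreasing
--     # order of their lengths
--     listofwords.sort(key=lambda x: len(x), reverse=True)
--
--     # Starting from the longest string
--     for i in listofwords:
--
--         # If current string can be made
--         # up from other strings
--         if canbuildword(i, 1, mp):
--             return i
--
--     return "-1"
-- ===== SOURCE B (Python) =====
-- def printlongestword(listofwords):
--     # Bottom-up suffix DP over a set of all words, instead of A's memoized
--     # top-down recursion threading a shared mutable dict across words.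
--     wordset = set(listofwords)
--     # Same in-place sort as A (stable, by length, descending).
--     listofwords.sort(key=lambda x: len(x), reverse=True)
--     for s in listofwords:
--         n = len(s)
--         # dp[i]: s[i:] is a concatenation of words (>= 2 pieces when i == 0)
--         dp = [False] * (n + 1)
--         for i in range(n - 1, -1, -1):
--             for j in range(i + 1, n + 1):
--                 if s[i:j] in wordset and (j == n or dp[j]) and not (i == 0 and j == n):
--                     dp[i] = True
--                     break
--         if dp[0]:
--             return s
--     return "-1"
-- ===== Notes on version B (the rewrite author's own statement) =====
-- stated objective: alternative
-- what changed: Replaces A's memoized top-down recursion over splits (threading a shared mutable dict of seen/failed substrings across words) with a per-word bottom-up suffix DP (dp[i] = s[i:] is a concatenation of dictionary words, >=2 pieces at i=0) over a plain set of the words; the same in-place sort and first-hit scan order are kept.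
import Mathlib
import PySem

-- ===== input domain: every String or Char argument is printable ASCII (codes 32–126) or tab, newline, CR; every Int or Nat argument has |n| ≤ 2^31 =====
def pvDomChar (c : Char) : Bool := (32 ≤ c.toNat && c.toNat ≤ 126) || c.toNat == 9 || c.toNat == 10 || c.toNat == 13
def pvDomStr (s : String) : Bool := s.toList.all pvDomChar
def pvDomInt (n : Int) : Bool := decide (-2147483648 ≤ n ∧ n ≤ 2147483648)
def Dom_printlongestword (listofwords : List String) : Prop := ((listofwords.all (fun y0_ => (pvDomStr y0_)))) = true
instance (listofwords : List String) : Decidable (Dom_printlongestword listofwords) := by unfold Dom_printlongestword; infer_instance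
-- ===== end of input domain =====

-- B replaces A's memoized top-down recursion (shared mutable dict) by a per-word
-- bottom-up suffix DP over a set of all words; Python A and B both sort the input
-- list in place the same way, and the equivalence proved is about the return value.
-- Strings are modelled by their character lists (PySem.Chars convention);
-- s[:i] / s[i:] / s[i:j] with 0 ≤ i ≤ j ≤ len(s) are List.take/drop
-- (exact: PySem.List.slice_natCast), len(x) is x.toList.length.

-- ===== PORT A =====
mutual
  -- canbuildword(s, isoriginalword, mp): returns (result, mp) since Python mutates mp
  def canbuildword (s : List Char) (isoriginalword : Int)
      (mp : PySem.Dict (List Char) Int) : Bool × PySem.Dict (List Char) Int :=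
    if mp.get? s = some 0 then (false, mp)
    else if mp.get? s = some 1 ∧ isoriginalword = 0 then (true, mp)
    else
      match canbuildLoop s 1 mp with
      | (true, mp') => (true, mp')
      | (false, mp') => (false, mp'.insert s 0)
  termination_by (s.length, s.length + 2)

  -- the 'for i in range(1, len(s))' loop of canbuildword (0 < i is the loop's own invariant)
  def canbuildLoop (s : List Char) (i : Nat)
      (mp : PySem.Dict (List Char) Int) : Bool × PySem.Dict (List Char) Int :=
    if h : 0 < i ∧ i < s.length then
      let left := s.take i
      let right := s.drop i
      if mp.get? left = some 1 then
        match canbuildword right 0 mp with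
        | (true, mp') => (true, mp')
        | (false, mp') => canbuildLoop s (i + 1) mp'
      else canbuildLoop s (i + 1) mp
    else (false, mp)
  termination_by (s.length, s.length + 1 - i)
end

-- the 'for i in listofwords: if canbuildword(i, 1, mp): return i' loop
def printLoop : List String → PySem.Dict (List Char) Int → String
  | [], _ => "-1"
  | i :: rest, mp =>
    match canbuildword i.toList 1 mp with
    | (true, _) => i
    | (false, mp') => printLoop rest mp'

def printlongestword (listofwords : List String) : String :=
  let mp := listofwords.foldl (fun d i => d.insert i.toList (1 : Int)) PySem.Dict.empty
  let sortedwords := PySem.List.sorted listofwords (fun x => x.toList.length) true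
  printLoop sortedwords mp

-- ===== PORT B =====
-- dp[i] ↔ s[i:] is a concatenation of set words (≥ 2 pieces when i = 0)
def altDp (cs : List Char) (wordset : PySem.Set (List Char)) : List Bool :=
  let n := cs.length
  ((List.range n).reverse).foldl
    (fun dp i =>
      if (List.range' (i + 1) (n - i)).any (fun j =>
            PySem.Set.contains wordset ((cs.drop i).take (j - i)) &&
            (decide (j = n) || dp.getD j false) &&
            !decide (i = 0 ∧ j = n))
      then dp.set i true else dp)
    (List.replicate (n + 1) false)

def altLoop : List String → PySem.Set (List Char) → String
  | [], _ => "-1"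
  | s :: rest, wordset =>
    if (altDp s.toList wordset).getD 0 false then s else altLoop rest wordset

def printlongestword_alt (listofwords : List String) : String :=
  let wordset : PySem.Set (List Char) :=
    PySem.Set.ofList (listofwords.map (fun w => w.toList))
  let sortedwords := PySem.List.sorted listofwords (fun x => x.toList.length) true
  altLoop sortedwords wordset

-- ===== PRECONDITION & SPEC =====
def Spec_printlongestword (listofwords : List String) (out : String) : Prop := out = printlongestword_alt listofwords
instance (listofwords : List String) (out : String) : Decidable (Spec_printlongestword listofwords out) := by unfold Spec_printlongestword; infer_instance

-- ===== CLAIM (what is proved, stated in full; the proofs are below) =====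
def Claim_equal_printlongestword : Prop := ∀ (listofwords : List String), Dom_printlongestword listofwords → Spec_printlongestword listofwords (printlongestword listofwords)

-- ===== LEMMAS AND PROOFS =====

-- cs is a concatenation of one or more nonempty words of ws
inductive ConW (ws : List (List Char)) : List Char → Prop
  | single (w : List Char) : w ∈ ws → w ≠ [] → ConW ws w
  | cons (w cs : List Char) : w ∈ ws → w ≠ [] → ConW ws cs → ConW ws (w ++ cs)

-- cs is a concatenation of two or more nonempty words of ws
def Tprop (ws : List (List Char)) (cs : List Char) : Prop :=
  ∃ k, 1 ≤ k ∧ k < cs.length ∧ cs.take k ∈ ws ∧ ConW ws (cs.drop k)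

theorem ConW_ne_nil {ws : List (List Char)} {cs : List Char} (h : ConW ws cs) : cs ≠ [] := by
  induction h with
  | single w hw hne => exact hne
  | cons w cs hw hne hc ih => simp [hne]

theorem ConW_iff {ws : List (List Char)} {cs : List Char} (hne : cs ≠ []) :
    ConW ws cs ↔ cs ∈ ws ∨ ∃ k, 1 ≤ k ∧ k < cs.length ∧ cs.take k ∈ ws ∧ ConW ws (cs.drop k) := by
  constructor
  · intro h
    cases h with
    | single w hw hne' => exact Or.inl hw
    | cons w cs' hw hne' hc =>
      refine Or.inr ⟨w.length, ?_, ?_, ?_, ?_⟩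
      · have := List.length_pos_iff.mpr hne'; omega
      · have h1 := List.length_pos_iff.mpr (ConW_ne_nil hc)
        simp [List.length_append]; omega
      · rw [List.take_left]; exact hw
      · rw [List.drop_left]; exact hc
  · rintro (hw | ⟨k, hk1, hk2, htk, hdk⟩)
    · exact ConW.single cs hw hne
    · have h := ConW.cons (cs.take k) (cs.drop k) htk
        (List.ne_nil_of_length_pos (by simp [List.length_take]; omega)) hdk
      simpa using h

-- the invariant A's mutable dict maintains while words of length ≥ L are processed
def InvW (ws : List (List Char)) (L : Nat) (mp : PySem.Dict (List Char) Int) : Prop :=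
  (∀ k, mp.get? k = some 1 → k ∈ ws) ∧
  (∀ k, k ∈ ws → mp.get? k = some 1 ∨ mp.get? k = some 0) ∧
  (∀ k, mp.get? k = some 0 →
      (k ∈ ws → L ≤ k.length ∧ ¬ Tprop ws k) ∧ (k ∉ ws → ¬ ConW ws k))

theorem InvW_mono {ws : List (List Char)} {L L' : Nat} {mp : PySem.Dict (List Char) Int}
    (h : InvW ws L mp) (hle : L' ≤ L) : InvW ws L' mp := by
  refine ⟨h.1, h.2.1, fun k hk => ⟨fun hkw => ⟨le_trans hle ((h.2.2 k hk).1 hkw).1, ((h.2.2 k hk).1 hkw).2⟩, (h.2.2 k hk).2⟩⟩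

theorem memVal {ws : List (List Char)} {L : Nat} {mp : PySem.Dict (List Char) Int}
    (h : InvW ws L mp) {k : List Char} (hk : k.length < L) :
    (mp.get? k = some 1 ↔ k ∈ ws) := by
  constructor
  · exact h.1 k
  · intro hkw
    rcases h.2.1 k hkw with h1 | h0
    · exact h1
    · exact absurd ((h.2.2 k h0).1 hkw).1 (by omega)

-- InvW is preserved by marking cs := 0 when the right fact about cs is known
theorem InvW_insert_zero_word {ws : List (List Char)} {L : Nat} {mp : PySem.Dict (List Char) Int}
    (h : InvW ws L mp) {cs : List Char} (hcs : cs ∈ ws) (hL : L ≤ cs.length)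
    (hT : ¬ Tprop ws cs) : InvW ws L (mp.insert cs 0) := by
  refine ⟨?_, ?_, ?_⟩
  · intro k hk
    by_cases he : k = cs
    · subst he; rw [PySem.Dict.get?_insert_self] at hk; exact absurd hk (by simp)
    · rw [PySem.Dict.get?_insert_of_ne _ _ he] at hk; exact h.1 k hk
  · intro k hkw
    by_cases he : k = cs
    · subst he; rw [PySem.Dict.get?_insert_self]; exact Or.inr rfl
    · rw [PySem.Dict.get?_insert_of_ne _ _ he]; exact h.2.1 k hkw
  · intro k hk
    by_cases he : k = cs
    · subst he; exact ⟨fun _ => ⟨hL, hT⟩, fun hn => absurd hcs hn⟩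
    · rw [PySem.Dict.get?_insert_of_ne _ _ he] at hk; exact h.2.2 k hk
theorem InvW_insert_zero_nonword {ws : List (List Char)} {L : Nat} {mp : PySem.Dict (List Char) Int}
    (h : InvW ws L mp) {cs : List Char} (hcs : cs ∉ ws) (hC : ¬ ConW ws cs) :
    InvW ws L (mp.insert cs 0) := by
  refine ⟨?_, ?_, ?_⟩
  · intro k hk
    by_cases he : k = cs
    · subst he; rw [PySem.Dict.get?_insert_self] at hk; exact absurd hk (by simp)
    · rw [PySem.Dict.get?_insert_of_ne _ _ he] at hk; exact h.1 k hk
  · intro k hkw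
    by_cases he : k = cs
    · subst he; exact absurd hkw hcs
    · rw [PySem.Dict.get?_insert_of_ne _ _ he]; exact h.2.1 k hkw
  · intro k hk
    by_cases he : k = cs
    · subst he; exact ⟨fun hw => absurd hw hcs, fun _ => hC⟩
    · rw [PySem.Dict.get?_insert_of_ne _ _ he] at hk; exact h.2.2 k hk


theorem canbuild_main (ws : List (List Char)) (L : Nat) : ∀ (m : Nat),
    (∀ cs mp, 4 * cs.length + 3 ≤ m → InvW ws L mp → cs ∈ ws → cs.length = L →
      ((canbuildword cs 1 mp).1 = true ↔ Tprop ws cs) ∧ InvW ws L (canbuildword cs 1 mp).2) ∧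
    (∀ cs mp, 4 * cs.length + 3 ≤ m → InvW ws L mp → cs ≠ [] → cs.length < L →
      ((canbuildword cs 0 mp).1 = true ↔ ConW ws cs) ∧ InvW ws L (canbuildword cs 0 mp).2) ∧
    (∀ cs i mp, 4 * cs.length + 2 ≤ m + i → 1 ≤ i → InvW ws L mp → cs.length ≤ L →
      ((canbuildLoop cs i mp).1 = true ↔
        ∃ k, i ≤ k ∧ k < cs.length ∧ cs.take k ∈ ws ∧ ConW ws (cs.drop k)) ∧
      InvW ws L (canbuildLoop cs i mp).2) := by
  intro m
  induction m using Nat.strong_induction_on with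
  | _ m IH =>
    refine ⟨?_, ?_, ?_⟩
    · -- top-level call (isoriginalword = 1)
      intro cs mp hm hInv hcsw hcsL
      rw [canbuildword]
      by_cases h0 : mp.get? cs = some 0
      · rw [if_pos h0]
        have hT : ¬ Tprop ws cs := ((hInv.2.2 cs h0).1 hcsw).2
        exact ⟨by simp [hT], hInv⟩
      · rw [if_neg h0, if_neg (by simp)]
        have hloop := (IH (m - 1) (by omega)).2.2 cs 1 mp (by omega) (by omega) hInv (by omega)
        have hTiff : ((canbuildLoop cs 1 mp).1 = true) ↔ Tprop ws cs := by
          rw [hloop.1]; rfl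
        rcases hres : canbuildLoop cs 1 mp with ⟨b, mp'⟩
        cases b
        · simp only
          have hT : ¬ Tprop ws cs := by rw [← hTiff, hres]; simp
          refine ⟨by simp [hT], ?_⟩
          have := hloop.2; rw [hres] at this
          exact InvW_insert_zero_word this hcsw (by omega) hT
        · simp only
          refine ⟨by simp [← hTiff, hres], ?_⟩
          have := hloop.2; rw [hres] at this; exact this
    · -- inner call (isoriginalword = 0)
      intro cs mp hm hInv hne hcsL
      rw [canbuildword]
      by_cases h0 : mp.get? cs = some 0
      · rw [if_pos h0]
        have hC : ¬ ConW ws cs := by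
          by_cases hw : cs ∈ ws
          · exact absurd ((hInv.2.2 cs h0).1 hw).1 (by omega)
          · exact (hInv.2.2 cs h0).2 hw
        exact ⟨by simp [hC], hInv⟩
      · by_cases h1 : mp.get? cs = some 1
        · rw [if_neg h0, if_pos ⟨h1, rfl⟩]
          exact ⟨by simp [ConW.single cs (hInv.1 cs h1) hne], hInv⟩
        · rw [if_neg h0, if_neg (by simp [h1])]
          have hloop := (IH (m - 1) (by omega)).2.2 cs 1 mp (by omega) (by omega) hInv (by omega)
          have hCiff : ((canbuildLoop cs 1 mp).1 = true) ↔
              (∃ k, 1 ≤ k ∧ k < cs.length ∧ cs.take k ∈ ws ∧ ConW ws (cs.drop k)) := hloop.1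
          have hcsnw : cs ∉ ws := by
            intro hw
            rcases hInv.2.1 cs hw with h | h
            · exact h1 h
            · exact h0 h
          rcases hres : canbuildLoop cs 1 mp with ⟨b, mp'⟩
          have hInv' := hloop.2; rw [hres] at hInv'
          cases b
          · simp only
            have hnotex : ¬ (∃ k, 1 ≤ k ∧ k < cs.length ∧ cs.take k ∈ ws ∧ ConW ws (cs.drop k)) := by
              rw [← hCiff, hres]; simp
            have hC : ¬ ConW ws cs := by
              rw [ConW_iff hne]
              rintro (hw | hex)
              · exact hcsnw hw
              · exact hnotex hex
            exact ⟨by simp [hC], InvW_insert_zero_nonword hInv' hcsnw hC⟩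
          · simp only
            refine ⟨?_, hInv'⟩
            simp only [true_iff]
            rw [ConW_iff hne]
            right
            rw [← hCiff, hres]
    · -- the loop
      intro cs i mp hm hi hInv hcsL
      rw [canbuildLoop]
      by_cases hg : 0 < i ∧ i < cs.length
      · rw [dif_pos hg]
        simp only
        have hleft : (mp.get? (cs.take i) = some 1) ↔ cs.take i ∈ ws := by
          apply memVal hInv
          simp [List.length_take]; omega
        by_cases hl : mp.get? (cs.take i) = some 1
        · rw [if_pos hl]
          have hword := (IH (m - 1) (by omega)).2.1 (cs.drop i) mp
            (by simp only [List.length_drop]; omega) hInv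
            (List.ne_nil_of_length_pos (by simp; omega)) (by simp; omega)
          rcases hres : canbuildword (cs.drop i) 0 mp with ⟨b, mp'⟩
          have hInv' := hword.2; rw [hres] at hInv'
          have hbiff : (b = true) ↔ ConW ws (cs.drop i) := by rw [← hword.1, hres]
          cases b
          · simp only
            have hloop := (IH (m - 1) (by omega)).2.2 cs (i + 1) mp' (by omega) (by omega) hInv' hcsL
            refine ⟨?_, hloop.2⟩
            rw [hloop.1]
            constructor
            · rintro ⟨k, hk1, hk2, hk3, hk4⟩; exact ⟨k, by omega, hk2, hk3, hk4⟩
            · rintro ⟨k, hk1, hk2, hk3, hk4⟩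
              refine ⟨k, ?_, hk2, hk3, hk4⟩
              rcases Nat.lt_or_ge k (i + 1) with h | h
              · have hki : k = i := by omega
                subst hki
                rw [← hbiff] at hk4
                simp at hk4
              · omega
          · simp only
            refine ⟨?_, hInv'⟩
            simp only [true_iff]
            exact ⟨i, le_refl _, hg.2, hleft.mp hl, hbiff.mp rfl⟩
        · rw [if_neg hl]
          have hloop := (IH (m - 1) (by omega)).2.2 cs (i + 1) mp (by omega) (by omega) hInv hcsL
          refine ⟨?_, hloop.2⟩
          rw [hloop.1]
          constructor
          · rintro ⟨k, hk1, hk2, hk3, hk4⟩; exact ⟨k, by omega, hk2, hk3, hk4⟩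
          · rintro ⟨k, hk1, hk2, hk3, hk4⟩
            refine ⟨k, ?_, hk2, hk3, hk4⟩
            rcases Nat.lt_or_ge k (i + 1) with h | h
            · have hki : k = i := by omega
              subst hki
              exact absurd hk3 (by rw [← hleft] at *; exact hl)
            · omega
      · rw [dif_neg hg]
        refine ⟨?_, hInv⟩
        constructor
        · intro h; simp at h
        · rintro ⟨k, hk1, hk2, _, _⟩
          exact absurd ⟨by omega, by omega⟩ hg


theorem altDp_aux (ws : List (List Char)) (sset : PySem.Set (List Char))
    (hset : ∀ x, PySem.Set.contains sset x = true ↔ x ∈ ws) (cs : List Char) :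
    ∀ (k m : Nat), m + k = cs.length →
      (((List.range' m k).reverse).foldl
        (fun dp i =>
          if (List.range' (i + 1) (cs.length - i)).any (fun j =>
                PySem.Set.contains sset ((cs.drop i).take (j - i)) &&
                (decide (j = cs.length) || dp.getD j false) &&
                !decide (i = 0 ∧ j = cs.length))
          then dp.set i true else dp)
        (List.replicate (cs.length + 1) false)).length = cs.length + 1 ∧
      ∀ j, (((List.range' m k).reverse).foldl
        (fun dp i =>
          if (List.range' (i + 1) (cs.length - i)).any (fun j =>
                PySem.Set.contains sset ((cs.drop i).take (j - i)) &&
                (decide (j = cs.length) || dp.getD j false) &&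
                !decide (i = 0 ∧ j = cs.length))
          then dp.set i true else dp)
        (List.replicate (cs.length + 1) false)).getD j false = true ↔
        (m ≤ j ∧ j < cs.length ∧ (if j = 0 then Tprop ws cs else ConW ws (cs.drop j))) := by
  intro k
  induction k with
  | zero =>
    intro m hm
    constructor
    · simp
    · intro j
      simp only [List.range', List.reverse_nil, List.foldl_nil]
      constructor
      · intro h
        by_cases hj : j < cs.length + 1
        · simp [List.getD_eq_getElem?_getD, hj] at h
        · simp [List.getD_eq_getElem?_getD, List.getElem?_eq_none (by simp; omega : (List.replicate (cs.length+1) false).length ≤ j)] at h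
      · rintro ⟨h1, h2, _⟩; omega
  | succ k ih =>
    intro m hm
    have hrec := ih (m + 1) (by omega)
    set f := (fun (dp : List Bool) (i : Nat) =>
          if (List.range' (i + 1) (cs.length - i)).any (fun j =>
                PySem.Set.contains sset ((cs.drop i).take (j - i)) &&
                (decide (j = cs.length) || dp.getD j false) &&
                !decide (i = 0 ∧ j = cs.length))
          then dp.set i true else dp) with hf
    have hsplit : ((List.range' m (k+1)).reverse).foldl f (List.replicate (cs.length + 1) false)
        = f (((List.range' (m+1) k).reverse).foldl f (List.replicate (cs.length + 1) false)) m := by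
      rw [List.range'_succ, List.reverse_cons, List.foldl_append]
      simp
    set dp' := ((List.range' (m+1) k).reverse).foldl f (List.replicate (cs.length + 1) false) with hdp'
    -- the any-condition at i = m is exactly R m
    have hmn : m < cs.length := by omega
    have hcond : ((List.range' (m + 1) (cs.length - m)).any (fun j =>
                PySem.Set.contains sset ((cs.drop m).take (j - m)) &&
                (decide (j = cs.length) || dp'.getD j false) &&
                !decide (m = 0 ∧ j = cs.length)) = true)
        ↔ (if m = 0 then Tprop ws cs else ConW ws (cs.drop m)) := by
      rw [List.any_eq_true]
      constructor
      · rintro ⟨j, hjmem, hj⟩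
        rw [List.mem_range'_1] at hjmem
        obtain ⟨hj1, hj2⟩ := hjmem
        have hj2 : j ≤ cs.length := by omega
        simp only [Bool.and_eq_true, Bool.or_eq_true, decide_eq_true_eq, Bool.not_eq_true',
          decide_eq_false_iff_not] at hj
        obtain ⟨⟨hpiece, hrest⟩, hexcl⟩ := hj
        rw [hset] at hpiece
        -- rest: j = n or dp'[j] (⇒ ConW (drop j), j < n)
        by_cases hm0 : m = 0
        · subst hm0
          rcases hrest with hjn | hdpj
          · exact absurd ⟨rfl, hjn⟩ hexcl
          · rw [(hrec.2 j)] at hdpj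
            obtain ⟨_, hjlt, hR⟩ := hdpj
            rw [if_neg (by omega)] at hR
            exact ⟨j, by omega, hjlt, by simpa using hpiece, hR⟩
        · rw [if_neg hm0]
          rcases hrest with hjn | hdpj
          · subst hjn
            have : (cs.drop m).take (cs.length - m) = cs.drop m := by
              apply List.take_of_length_le; simp
            rw [this] at hpiece
            exact ConW.single _ hpiece (List.ne_nil_of_length_pos (by simp; omega))
          · rw [(hrec.2 j)] at hdpj
            obtain ⟨_, hjlt, hR⟩ := hdpj
            rw [if_neg (by omega)] at hR
            have : cs.drop m = (cs.drop m).take (j - m) ++ cs.drop j := by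
              have h1 : (cs.drop m).drop (j - m) = cs.drop j := by
                rw [List.drop_drop]; congr 1; omega
              rw [← h1, List.take_append_drop]
            rw [this]
            exact ConW.cons _ _ hpiece (List.ne_nil_of_length_pos (by simp [List.length_take]; omega)) hR
      · intro hR
        by_cases hm0 : m = 0
        · subst hm0
          rw [if_pos rfl] at hR
          obtain ⟨j, hj1, hj2, htk, hdk⟩ := hR
          refine ⟨j, by rw [List.mem_range'_1]; omega, ?_⟩
          simp only [Bool.and_eq_true, Bool.or_eq_true, decide_eq_true_eq, Bool.not_eq_true',
            decide_eq_false_iff_not]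
          refine ⟨⟨?_, Or.inr ?_⟩, by omega⟩
          · rw [hset]; simpa using htk
          · rw [(hrec.2 j)]
            exact ⟨by omega, hj2, by rw [if_neg (by omega)]; exact hdk⟩
        · rw [if_neg hm0] at hR
          rw [ConW_iff (List.ne_nil_of_length_pos (by simp; omega))] at hR
          rcases hR with hw | ⟨k', hk1, hk2, htk, hdk⟩
          · refine ⟨cs.length, by rw [List.mem_range'_1]; omega, ?_⟩
            simp only [Bool.and_eq_true, Bool.or_eq_true, decide_eq_true_eq, Bool.not_eq_true',
              decide_eq_false_iff_not]
            refine ⟨⟨?_, Or.inl (by simp)⟩, by omega⟩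
            rw [hset]
            have : (cs.drop m).take (cs.length - m) = cs.drop m := by
              apply List.take_of_length_le; simp
            rw [this]; exact hw
          · have hklen : (cs.drop m).length = cs.length - m := by simp
            refine ⟨m + k', by rw [List.mem_range'_1]; omega, ?_⟩
            simp only [Bool.and_eq_true, Bool.or_eq_true, decide_eq_true_eq, Bool.not_eq_true',
              decide_eq_false_iff_not]
            have hdrop : (cs.drop m).drop k' = cs.drop (m + k') := by
              rw [List.drop_drop]
            refine ⟨⟨?_, Or.inr ?_⟩, by omega⟩
            · rw [hset]; simpa using htk
            · rw [(hrec.2 (m + k'))]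
              refine ⟨by omega, by omega, ?_⟩
              rw [if_neg (by omega), ← hdrop]
              exact hdk
    rw [hsplit]
    constructor
    · simp only [hf]
      split
      · simp [hrec.1]
      · exact hrec.1
    · intro j
      simp only [hf]
      by_cases hC : (List.range' (m + 1) (cs.length - m)).any (fun j =>
                PySem.Set.contains sset ((cs.drop m).take (j - m)) &&
                (decide (j = cs.length) || dp'.getD j false) &&
                !decide (m = 0 ∧ j = cs.length)) = true
      · rw [if_pos hC]
        by_cases hjm : j = m
        · subst hjm
          rw [List.getD_eq_getElem?_getD, List.getElem?_set_self (by rw [hrec.1]; omega)]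
          simp only [Option.getD_some]
          constructor
          · intro _
            exact ⟨le_refl _, hmn, hcond.mp hC⟩
          · intro _; simp
        · rw [List.getD_eq_getElem?_getD, List.getElem?_set_ne (by omega), ← List.getD_eq_getElem?_getD]
          rw [hrec.2 j]
          constructor
          · rintro ⟨h1, h2, h3⟩; exact ⟨by omega, h2, h3⟩
          · rintro ⟨h1, h2, h3⟩; exact ⟨by omega, h2, h3⟩
      · rw [if_neg hC]
        rw [hrec.2 j]
        constructor
        · rintro ⟨h1, h2, h3⟩; exact ⟨by omega, h2, h3⟩
        · rintro ⟨h1, h2, h3⟩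
          refine ⟨?_, h2, h3⟩
          rcases Nat.lt_or_ge m j with h | h
          · omega
          · have hjm : j = m := by omega
            subst hjm
            exact absurd (hcond.mpr h3) hC


theorem altDp_spec (ws : List (List Char)) (sset : PySem.Set (List Char))
    (hset : ∀ x, PySem.Set.contains sset x = true ↔ x ∈ ws) (cs : List Char) :
    ((altDp cs sset).getD 0 false = true ↔ Tprop ws cs) := by
  have h := (altDp_aux ws sset hset cs cs.length 0 (by omega)).2 0
  unfold altDp
  simp only [List.range_eq_range']
  rw [h]
  constructor
  · rintro ⟨_, _, h3⟩
    simpa using h3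
  · intro hT
    obtain ⟨k, hk1, hk2, _, _⟩ := hT
    exact ⟨le_refl _, by omega, by simpa using ⟨k, hk1, hk2, ‹_›, ‹_›⟩⟩

theorem mp0_get? (l : List String) (d : PySem.Dict (List Char) Int) (k : List Char) :
    (l.foldl (fun d i => d.insert i.toList (1 : Int)) d).get? k =
      if k ∈ l.map (fun w => w.toList) then some 1 else d.get? k := by
  induction l generalizing d with
  | nil => simp
  | cons w t ih =>
    simp only [List.foldl_cons, ih, List.map_cons, List.mem_cons]
    by_cases hk : k ∈ t.map (fun w => w.toList)
    · simp [hk]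
    · by_cases he : k = w.toList
      · simp [he, PySem.Dict.get?_insert_self]
      · simp [hk, he, PySem.Dict.get?_insert_of_ne _ _ he]


theorem setContains_iff (ws : List (List Char)) (x : List Char) :
    PySem.Set.contains (PySem.Set.ofList ws) x = true ↔ x ∈ ws := by
  simp [PySem.Set.contains]

theorem loop_eq (ws : List (List Char)) (sset : PySem.Set (List Char))
    (hset : ∀ x, PySem.Set.contains sset x = true ↔ x ∈ ws) :
    ∀ (l : List String) (mp : PySem.Dict (List Char) Int) (L : Nat),
      InvW ws L mp → (∀ w ∈ l, w.toList ∈ ws) → (∀ w ∈ l, w.toList.length ≤ L) →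
      l.Pairwise (fun a b => b.toList.length ≤ a.toList.length) →
      printLoop l mp = altLoop l sset := by
  intro l
  induction l with
  | nil => intro mp L _ _ _ _; rfl
  | cons w rest ih =>
    intro mp L hInv hmem hlen hpair
    have hInvw : InvW ws (w.toList.length) mp := InvW_mono hInv (hlen w (by simp))
    have hword := (canbuild_main ws w.toList.length (4 * w.toList.length + 3)).1
      w.toList mp (le_refl _) hInvw (hmem w (by simp)) rfl
    have hdp := altDp_spec ws sset hset w.toList
    rw [printLoop, altLoop]
    rcases hres : canbuildword w.toList 1 mp with ⟨b, mp'⟩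
    have hInv' := hword.2; rw [hres] at hInv'
    have hbiff : (b = true) ↔ Tprop ws w.toList := by rw [← hword.1, hres]
    cases b
    · have hT : ¬ Tprop ws w.toList := by rw [← hbiff]; simp
      have hdpf : (altDp w.toList sset).getD 0 false = false := by
        rcases hb : (altDp w.toList sset).getD 0 false
        · rfl
        · exact absurd (hdp.mp hb) hT
      rw [hdpf]
      simp only [Bool.false_eq_true, if_false]
      exact ih mp' w.toList.length hInv'
        (fun x hx => hmem x (by simp [hx]))
        (fun x hx => (List.pairwise_cons.mp hpair).1 x hx)
        (List.pairwise_cons.mp hpair).2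
    · have hT : Tprop ws w.toList := hbiff.mp rfl
      have hdpt : (altDp w.toList sset).getD 0 false = true := hdp.mpr hT
      rw [hdpt]
      simp

-- ===== VERDICT (by name: the statement is the Claim_ definition above) =====
theorem printlongestword_spec : Claim_equal_printlongestword := by
  intro lw _
  unfold Spec_printlongestword printlongestword printlongestword_alt
  simp only []
  set ws := lw.map (fun w => w.toList) with hws
  set L0 := lw.foldl (fun a w => max a w.toList.length) 0 with hL0
  have hmp0 : ∀ k, (lw.foldl (fun d i => d.insert i.toList (1 : Int)) PySem.Dict.empty).get? k
      = if k ∈ ws then some 1 else none := by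
    intro k
    rw [mp0_get?]
    simp [hws]
  have hInv0 : InvW ws L0 (lw.foldl (fun d i => d.insert i.toList (1 : Int)) PySem.Dict.empty) := by
    refine ⟨?_, ?_, ?_⟩
    · intro k hk
      rw [hmp0 k] at hk
      by_cases h : k ∈ ws
      · exact h
      · simp [h] at hk
    · intro k hkw
      rw [hmp0 k, if_pos hkw]
      exact Or.inl rfl
    · intro k hk
      rw [hmp0 k] at hk
      by_cases h : k ∈ ws <;> simp [h] at hk
  apply loop_eq ws _ (setContains_iff ws)
    (PySem.List.sorted lw (fun x => x.toList.length) true) _ L0 hInv0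
  · intro w hw
    rw [PySem.List.mem_sorted] at hw
    simp [hws]
    exact ⟨w, hw, rfl⟩
  · intro w hw
    rw [PySem.List.mem_sorted] at hw
    exact (PySem.List.le_foldl_max_nat lw (fun w => w.toList.length) 0).2 w hw
  · exact PySem.List.sorted_pairwise_rev lw (fun x => x.toList.length)
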